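-- pv_equiv track=rewrite | github.com/L3B0W5K1/Cellview | cellivew.py | compute_bit_positions
-- ===== SOURCE A (Python) =====
-- def compute_bit_positions(cable_lines):
--     positions_per_row = []
--     for line in cable_lines:
--         positions = []
--         for i, ch in enumerate(line):
--             if ch in "-_":
--                 positions.append(i)
--         for i, ch in enumerate(line):
--             if ch in ("/", "\\"):
--                 for j in range(i + 1, min(len(line), i + 40)):
--                     if line[j] == " ":
--                         positions.append(j)
--                     else:
--                         break
--         positions = sorted(set(positions))
--         positions_per_row.append(positions)
--     return positions_per_row
-- ===== SOURCE B (Python) =====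
-- def compute_bit_positions(cable_lines):
--     # Single left-to-right pass per line: emit dash/underscore indices directly,
--     # and track the distance since the last slash to emit trailing-space indices,
--     # so indices come out already sorted and distinct (no sorted(set(...)) pass).
--     positions_per_row = []
--     for line in cable_lines:
--         positions = []
--         dist = None
--         for i, ch in enumerate(line):
--             if ch in "-_":
--                 positions.append(i)
--                 dist = None
--             elif ch in "/\\":
--                 dist = 0
--             elif ch == " " and dist is not None:
--                 dist += 1
--                 if dist <= 39:
--                     positions.append(i)
--             else:
--                 dist = None
--         positions_per_row.append(positions)
--     return positions_per_row
-- ===== Notes on version B (the rewrite author's own statement) =====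
-- stated objective: faster
-- what changed: Replaces A's three passes per line (dash scan, slash scan with a nested up-to-39-char lookahead per slash, then sorted(set(...))) by one left-to-right pass that keeps a distance-since-last-slash counter and emits indices already sorted and distinct.
import Mathlib
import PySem

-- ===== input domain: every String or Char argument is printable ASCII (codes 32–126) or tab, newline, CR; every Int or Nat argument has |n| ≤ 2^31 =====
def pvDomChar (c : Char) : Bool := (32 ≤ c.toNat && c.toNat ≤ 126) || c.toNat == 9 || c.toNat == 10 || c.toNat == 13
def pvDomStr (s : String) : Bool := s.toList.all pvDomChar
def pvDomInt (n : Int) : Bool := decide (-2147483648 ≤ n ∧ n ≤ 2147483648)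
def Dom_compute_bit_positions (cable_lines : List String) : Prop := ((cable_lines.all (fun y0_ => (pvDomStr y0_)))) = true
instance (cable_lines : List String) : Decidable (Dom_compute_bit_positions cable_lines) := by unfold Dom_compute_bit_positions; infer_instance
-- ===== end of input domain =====

-- B replaces A's three passes per line (dash scan, per-slash bounded lookahead, sorted(set(...)))
-- by one left-to-right pass with a distance-since-last-slash counter; measured constant-factor speedup.

-- ===== PORT A =====
-- ch in "-_"  /  ch in ("/", "\\")  on a single character
def pvDash (c : Char) : Bool := c == '-' || c == '_'
def pvSlash (c : Char) : Bool := c == '/' || c == '\\'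

-- 'for j in range(i+1, min(len(line), i+40)): if line[j] == " ": positions.append(j) else: break'
-- (pyGet? returning none is Python's IndexError; j is always in range here, so that branch is unreachable)
def pvRunA (line : List Char) (js : List Int) (acc : List Int) : List Int :=
  match js with
  | [] => acc
  | j :: rest =>
    match PySem.List.pyGet? line j with
    | some ch => if ch = ' ' then pvRunA line rest (acc ++ [j]) else acc
    | none => acc

def pvLineA (line : List Char) : List Int :=
  let p1 := (PySem.List.enumerate line 0).foldl
    (fun acc p => if pvDash p.2 then acc ++ [p.1] else acc) []
  let p2 := (PySem.List.enumerate line 0).foldl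
    (fun acc p => if pvSlash p.2 then
        pvRunA line (PySem.List.pyRange (p.1 + 1) (min (PySem.List.len line) (p.1 + 40)) 1) acc
      else acc) p1
  PySem.List.sorted (PySem.Set.ofList p2) (fun x => x) false

def compute_bit_positions (cable_lines : List String) : List (List Int) :=
  cable_lines.foldl (fun acc s => acc ++ [pvLineA s.toList]) []

-- ===== PORT B =====
-- one pass: state = (positions, dist since last slash: None or the count of spaces emitted)
def pvStepB (st : List Int × Option Int) (p : Int × Char) : List Int × Option Int :=
  if pvDash p.2 then (st.1 ++ [p.1], none)
  else if pvSlash p.2 then (st.1, some 0)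
  else
    match st.2 with
    | some d =>
      if p.2 = ' ' then
        (if d + 1 ≤ 39 then (st.1 ++ [p.1], some (d + 1)) else (st.1, some (d + 1)))
      else (st.1, none)
    | none => (st.1, none)

def pvLineB (line : List Char) : List Int :=
  ((PySem.List.enumerate line 0).foldl pvStepB ([], none)).1

def compute_bit_positions_alt (cable_lines : List String) : List (List Int) :=
  cable_lines.foldl (fun acc s => acc ++ [pvLineB s.toList]) []

-- ===== PRECONDITION & SPEC =====
def Spec_compute_bit_positions (cable_lines : List String) (out : List (List Int)) : Prop := out = compute_bit_positions_alt cable_lines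
instance (cable_lines : List String) (out : List (List Int)) : Decidable (Spec_compute_bit_positions cable_lines out) := by unfold Spec_compute_bit_positions; infer_instance

-- ===== CLAIM (what is proved, stated in full; the proofs are below) =====
def Claim_equal_compute_bit_positions : Prop := ∀ (cable_lines : List String), Dom_compute_bit_positions cable_lines → Spec_compute_bit_positions cable_lines (compute_bit_positions cable_lines)

-- ===== LEMMAS AND PROOFS =====

-- character at index j, default ' ' (only ever used at j < cs.length)
def cget (cs : List Char) (j : Nat) : Char := cs.getD j ' '

-- "the last slash before i is at i-k-1, with only spaces in between"
def SlashAt (cs : List Char) (i k : Nat) : Prop :=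
  k < i ∧ pvSlash (cget cs (i - k - 1)) = true ∧ ∀ m, i - k - 1 < m → m < i → cget cs m = ' '

def slashAtB (cs : List Char) (i k : Nat) : Bool :=
  decide (k < i) && pvSlash (cget cs (i - k - 1)) &&
    (List.range i).all (fun m => decide (m ≤ i - k - 1) || (cget cs m == ' '))

def goodB (cs : List Char) (j : Nat) : Bool :=
  pvDash (cget cs j) || ((cget cs j == ' ') && (List.range 39).any (fun k => slashAtB cs j k))

def Good (cs : List Char) (j : Nat) : Prop :=
  pvDash (cget cs j) = true ∨ (cget cs j = ' ' ∧ ∃ k, k < 39 ∧ SlashAt cs j k)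

def pvTgt (cs : List Char) : List Int :=
  ((List.range cs.length).filter (goodB cs)).map (fun j : Nat => (j : Int))

lemma slashAtB_iff (cs : List Char) (i k : Nat) : slashAtB cs i k = true ↔ SlashAt cs i k := by
  simp only [slashAtB, SlashAt, Bool.and_eq_true, decide_eq_true_eq, List.all_eq_true,
    List.mem_range, Bool.or_eq_true, beq_iff_eq]
  constructor
  · rintro ⟨⟨h1, h2⟩, h3⟩
    exact ⟨h1, h2, fun m hm1 hm2 => (h3 m hm2).resolve_left (by omega)⟩
  · rintro ⟨h1, h2, h3⟩
    refine ⟨⟨h1, h2⟩, fun m hm => ?_⟩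
    by_cases h : m ≤ i - k - 1
    · exact Or.inl h
    · exact Or.inr (h3 m (by omega) hm)

lemma goodB_iff (cs : List Char) (j : Nat) : goodB cs j = true ↔ Good cs j := by
  simp only [goodB, Good, Bool.or_eq_true, Bool.and_eq_true, beq_iff_eq, List.any_eq_true,
    List.mem_range, slashAtB_iff]

lemma pvSlash_ne_space {c : Char} (h : pvSlash c = true) : c ≠ ' ' := by
  simp only [pvSlash, Bool.or_eq_true, beq_iff_eq] at h
  rcases h with h | h <;> subst h <;> decide

lemma pvDash_ne_space {c : Char} (h : pvDash c = true) : c ≠ ' ' := by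
  simp only [pvDash, Bool.or_eq_true, beq_iff_eq] at h
  rcases h with h | h <;> subst h <;> decide

lemma pvSlash_of_dash {c : Char} (h : pvDash c = true) : pvSlash c = false := by
  simp only [pvDash, Bool.or_eq_true, beq_iff_eq] at h
  rcases h with h | h <;> subst h <;> decide

lemma slashAt_unique {cs : List Char} {i k1 k2 : Nat}
    (h1 : SlashAt cs i k1) (h2 : SlashAt cs i k2) : k1 = k2 := by
  obtain ⟨ha1, ha2, ha3⟩ := h1
  obtain ⟨hb1, hb2, hb3⟩ := h2
  rcases Nat.lt_trichotomy k1 k2 with h | h | h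
  · exact absurd (hb3 (i - k1 - 1) (by omega) (by omega)) (pvSlash_ne_space ha2)
  · exact h
  · exact absurd (ha3 (i - k2 - 1) (by omega) (by omega)) (pvSlash_ne_space hb2)

lemma cget_lt {cs : List Char} {j : Nat} (h : j < cs.length) : cget cs j = cs[j] :=
  List.getD_eq_getElem cs ' ' h

lemma pyget_space_iff (cs : List Char) (mi : Int) (h : 0 ≤ mi) :
    PySem.List.pyGet? cs mi = some ' ' ↔ (mi.toNat < cs.length ∧ cget cs mi.toNat = ' ') := by
  rw [PySem.List.pyGet?_of_nonneg cs h]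
  constructor
  · intro hg
    have hlt : mi.toNat < cs.length := by
      by_contra hge
      rw [List.getElem?_eq_none (by omega)] at hg
      cases hg
    rw [List.getElem?_eq_getElem hlt] at hg
    refine ⟨hlt, ?_⟩
    rw [cget_lt hlt]
    exact Option.some.inj hg
  · rintro ⟨hlt, hc⟩
    rw [List.getElem?_eq_getElem hlt, ← cget_lt hlt, hc]

-- ---------- A side ----------

lemma pvRunA_acc (cs : List Char) (js : List Int) (acc : List Int) :
    pvRunA cs js acc = acc ++ pvRunA cs js [] := by
  induction js generalizing acc with
  | nil => simp [pvRunA]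
  | cons j rest ih =>
    simp only [pvRunA]
    cases hg : PySem.List.pyGet? cs j with
    | none => simp
    | some ch =>
      by_cases hch : ch = ' '
      · simp only [hch]
        rw [ih (acc ++ [j]), ih ([] ++ [j])]
        simp
      · simp [hch]

lemma mem_pvRunA (cs : List Char) (b : Int) :
    ∀ (fuel : Nat) (a : Int), (b - a).toNat = fuel → ∀ x : Int,
      (x ∈ pvRunA cs (PySem.List.pyRange a b 1) [] ↔
        (a ≤ x ∧ x < b ∧ ∀ m : Int, a ≤ m → m ≤ x → PySem.List.pyGet? cs m = some ' ')) := by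
  intro fuel
  induction fuel with
  | zero =>
    intro a ha x
    have hba : b ≤ a := by omega
    rw [PySem.List.pyRange_one_eq_nil hba]
    simp only [pvRunA, List.not_mem_nil, false_iff]
    rintro ⟨h1, h2, _⟩; omega
  | succ n ih =>
    intro a ha x
    have hab : a < b := by omega
    rw [PySem.List.pyRange_one_cons hab]
    cases hg : PySem.List.pyGet? cs a with
    | none =>
      simp only [pvRunA, hg, List.not_mem_nil, false_iff]
      rintro ⟨h1, h2, h3⟩
      have := h3 a le_rfl h1
      rw [hg] at this; cases this
    | some ch =>
      by_cases hch : ch = ' '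
      · subst hch
        have hstep : pvRunA cs (a :: PySem.List.pyRange (a + 1) b 1) []
            = pvRunA cs (PySem.List.pyRange (a + 1) b 1) [a] := by
          simp [pvRunA, hg]
        rw [hstep, pvRunA_acc, List.mem_append, List.mem_singleton,
          ih (a + 1) (by omega) x]
        constructor
        · rintro (hxa | ⟨h1, h2, h3⟩)
          · exact ⟨by omega, by omega, fun m hm1 hm2 => by
              have hma : m = a := by omega
              rw [hma, hg]⟩
          · refine ⟨by omega, h2, fun m hm1 hm2 => ?_⟩
            rcases eq_or_lt_of_le hm1 with h | h
            · rw [← h, hg]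
            · exact h3 m (by omega) hm2
        · rintro ⟨h1, h2, h3⟩
          by_cases hx : x = a
          · exact Or.inl hx
          · exact Or.inr ⟨by omega, h2, fun m hm1 hm2 => h3 m (by omega) hm2⟩
      · have hstep : pvRunA cs (a :: PySem.List.pyRange (a + 1) b 1) [] = [] := by
          simp [pvRunA, hg, hch]
        rw [hstep]
        simp only [List.not_mem_nil, false_iff]
        rintro ⟨h1, h2, h3⟩
        have := h3 a le_rfl h1
        rw [hg] at this
        exact hch (Option.some.inj this)

def pvP1 (cs : List Char) : List Int :=
  (PySem.List.enumerate cs 0).foldl (fun acc p => if pvDash p.2 then acc ++ [p.1] else acc) []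

def pvP2 (cs : List Char) : List Int :=
  (PySem.List.enumerate cs 0).foldl
    (fun acc p => if pvSlash p.2 then
        pvRunA cs (PySem.List.pyRange (p.1 + 1) (min (PySem.List.len cs) (p.1 + 40)) 1) acc
      else acc) (pvP1 cs)

lemma pvLineA_def (cs : List Char) :
    pvLineA cs = PySem.List.sorted (PySem.Set.ofList (pvP2 cs)) (fun x => x) false := rfl

lemma mem_pvP1 (cs : List Char) (x : Int) :
    x ∈ pvP1 cs ↔ ∃ j : Nat, j < cs.length ∧ pvDash (cget cs j) = true ∧ x = (j : Int) := by
  unfold pvP1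
  rw [PySem.List.foldl_append_if (fun p : Int × Char => pvDash p.2) (fun p => p.1)]
  simp only [List.nil_append, List.mem_map, List.mem_filter, PySem.List.mem_enumerate_iff]
  constructor
  · rintro ⟨p, ⟨⟨k, hk, rfl⟩, hd⟩, rfl⟩
    exact ⟨k, hk, by rwa [cget_lt hk], by simp⟩
  · rintro ⟨j, hj, hd, rfl⟩
    exact ⟨((j : Int), cs[j]), ⟨⟨j, hj, by simp⟩, by rwa [cget_lt hj] at hd⟩, rfl⟩

lemma pvP2_eq (cs : List Char) :
    pvP2 cs = pvP1 cs ++ (PySem.List.enumerate cs 0).flatMap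
      (fun p => if pvSlash p.2 then
        pvRunA cs (PySem.List.pyRange (p.1 + 1) (min (PySem.List.len cs) (p.1 + 40)) 1) []
      else []) := by
  unfold pvP2
  rw [show (fun (acc : List Int) (p : Int × Char) => if pvSlash p.2 then
        pvRunA cs (PySem.List.pyRange (p.1 + 1) (min (PySem.List.len cs) (p.1 + 40)) 1) acc
      else acc)
    = (fun acc p => acc ++ (if pvSlash p.2 then
        pvRunA cs (PySem.List.pyRange (p.1 + 1) (min (PySem.List.len cs) (p.1 + 40)) 1) []
      else [])) from funext fun acc => funext fun p => by
        by_cases h : pvSlash p.2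
        · rw [if_pos h, if_pos h, pvRunA_acc]
        · rw [if_neg h, if_neg h, List.append_nil]]
  exact PySem.List.foldl_append_eq_flatMap _ _ _

lemma mem_pvP2 (cs : List Char) (x : Int) :
    x ∈ pvP2 cs ↔ ∃ j : Nat, j < cs.length ∧ Good cs j ∧ x = (j : Int) := by
  rw [pvP2_eq, List.mem_append, List.mem_flatMap, mem_pvP1]
  constructor
  · rintro (⟨j, hj, hd, rfl⟩ | ⟨p, hp, hx⟩)
    · exact ⟨j, hj, Or.inl hd, rfl⟩
    · rw [PySem.List.mem_enumerate_iff] at hp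
      obtain ⟨k, hk, rfl⟩ := hp
      simp only [zero_add] at hx
      by_cases hsl : pvSlash cs[k]
      · rw [if_pos hsl] at hx
        rw [mem_pvRunA cs _ _ _ rfl x] at hx
        obtain ⟨h1, h2, h3⟩ := hx
        simp only [PySem.List.len_eq, lt_min_iff] at h2
        have hx0 : 0 ≤ x := by omega
        set j := x.toNat with hj
        have hxj : x = (j : Int) := by omega
        have hjn : j < cs.length := by omega
        have hcj : cget cs j = ' ' := by
          have := h3 x h1 le_rfl
          rw [pyget_space_iff cs x hx0] at this
          exact this.2
        refine ⟨j, hjn, Or.inr ⟨hcj, j - k - 1, by omega, ⟨by omega, ?_, ?_⟩⟩, hxj⟩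
        · have hidx : j - (j - k - 1) - 1 = k := by omega
          rw [hidx, cget_lt hk]
          exact hsl
        · intro m hm1 hm2
          have hm3 : (k : Int) + 1 ≤ (m : Int) := by omega
          have hm4 : (m : Int) ≤ x := by omega
          have := h3 (m : Int) hm3 hm4
          rw [pyget_space_iff cs (m : Int) (by omega)] at this
          simpa using this.2
      · rw [if_neg hsl] at hx
        cases hx
  · rintro ⟨j, hj, hg, rfl⟩
    rcases hg with hd | ⟨hs, k, hk39, hkj, hsl, hsp⟩
    · exact Or.inl ⟨j, hj, hd, rfl⟩
    · right
      set s := j - k - 1 with hsdef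
      have hsj : s < j := by omega
      have hsn : s < cs.length := by omega
      refine ⟨((s : Int), cs[s]), ?_, ?_⟩
      · rw [PySem.List.mem_enumerate_iff]
        exact ⟨s, hsn, by simp⟩
      · rw [if_pos (by rwa [← cget_lt hsn])]
        rw [mem_pvRunA cs _ _ _ rfl]
        refine ⟨by omega, ?_, ?_⟩
        · simp only [PySem.List.len_eq, lt_min_iff]
          constructor <;> omega
        · intro m hm1 hm2
          have hm0 : 0 ≤ m := by omega
          rw [pyget_space_iff cs m hm0]
          have hmn : m.toNat < cs.length := by omega
          refine ⟨hmn, ?_⟩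
          by_cases hmj : m.toNat = j
          · rw [hmj]; exact hs
          · exact hsp m.toNat (by omega) (by omega)

lemma pairwise_pvTgt (cs : List Char) : (pvTgt cs).Pairwise (fun a b : Int => a < b) := by
  unfold pvTgt
  refine List.Pairwise.map _ ?_ ((List.pairwise_lt_range).filter _)
  intro a b h
  exact_mod_cast h

lemma nodup_pvTgt (cs : List Char) : (pvTgt cs).Nodup :=
  (pairwise_pvTgt cs).imp ne_of_lt

lemma mem_pvTgt (cs : List Char) (x : Int) :
    x ∈ pvTgt cs ↔ ∃ j : Nat, j < cs.length ∧ Good cs j ∧ x = (j : Int) := by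
  unfold pvTgt
  simp only [List.mem_map, List.mem_filter, List.mem_range, goodB_iff]
  constructor
  · rintro ⟨j, ⟨hj, hg⟩, rfl⟩
    exact ⟨j, hj, hg, rfl⟩
  · rintro ⟨j, hj, hg, rfl⟩
    exact ⟨j, ⟨hj, hg⟩, rfl⟩

lemma lineA_eq (cs : List Char) : pvLineA cs = pvTgt cs := by
  rw [pvLineA_def]
  apply PySem.List.sorted_eq_of_perm_of_pairwise_lt
  · rw [List.perm_ext_iff_of_nodup (nodup_pvTgt cs) (PySem.Set.nodup_ofList _)]
    intro x
    rw [PySem.Set.mem_ofList, mem_pvTgt, mem_pvP2]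
  · exact pairwise_pvTgt cs

-- ---------- B side ----------

def pvInv (cs : List Char) (i : Nat) (d : Option Int) : Prop :=
  (∀ x : Int, d = some x → ∃ k : Nat, x = (k : Int) ∧ SlashAt cs i k) ∧
  (d = none → ∀ k : Nat, ¬ SlashAt cs i k)

lemma B_loop (cs : List Char) :
    ∀ (ds : List Char) (i : Nat) (d : Option Int) (acc : List Int),
      cs.drop i = ds → pvInv cs i d →
      ((PySem.List.enumerate ds (i : Int)).foldl pvStepB (acc, d)).1
        = acc ++ ((List.range' i ds.length).filter (goodB cs)).map (fun j : Nat => (j : Int)) := by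
  intro ds
  induction ds with
  | nil =>
    intro i d acc _ _
    simp [PySem.List.enumerate_nil]
  | cons ch tl ih =>
    intro i d acc hdrop hinv
    have hi : i < cs.length := by
      by_contra h
      rw [List.drop_eq_nil_of_le (Nat.le_of_not_lt h)] at hdrop
      simp at hdrop
    have hch : cget cs i = ch := by
      have h0 : (cs.drop i)[0]? = some ch := by rw [hdrop]; rfl
      rw [List.getElem?_drop] at h0
      simp only [Nat.add_zero] at h0
      unfold cget
      rw [List.getD_eq_getElem?_getD, h0]
      rfl
    have htl : cs.drop (i + 1) = tl := by
      have h2 := congrArg (List.drop 1) hdrop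
      rw [List.drop_drop] at h2
      simpa [Nat.add_comm] using h2
    have hcast : ((i : Int) + 1) = (((i + 1 : Nat)) : Int) := by push_cast; ring
    rw [PySem.List.enumerate_cons, List.foldl_cons, List.length_cons, List.range'_succ,
      hcast]
    by_cases hdash : pvDash ch
    · -- dash: emit i, reset
      have hstep : pvStepB (acc, d) ((i : Int), ch) = (acc ++ [(i : Int)], none) := by
        simp [pvStepB, hdash]
      rw [hstep, ih (i + 1) none (acc ++ [(i : Int)]) htl ?_]
      · have hg : goodB cs i = true := by simp [goodB, hch, hdash]
        rw [List.filter_cons_of_pos hg, List.map_cons]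
        simp
      · refine ⟨by simp, fun _ k hsl => ?_⟩
        obtain ⟨h1s, h2s, h3s⟩ := hsl
        rcases Nat.eq_zero_or_pos k with hk | hk
        · subst hk
          have hidx : i + 1 - 0 - 1 = i := by omega
          rw [hidx, hch, pvSlash_of_dash hdash] at h2s
          cases h2s
        · have := h3s i (by omega) (by omega)
          rw [hch] at this
          exact pvDash_ne_space hdash this
    · by_cases hslash : pvSlash ch
      · -- slash: start a run
        have hstep : pvStepB (acc, d) ((i : Int), ch) = (acc, some 0) := by
          simp [pvStepB, hdash, hslash]
        rw [hstep, ih (i + 1) (some 0) acc htl ?_]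
        · have hg : goodB cs i = false := by
            have hne : (ch == ' ') = false := by
              simp [pvSlash_ne_space hslash]
            simp [goodB, hch, hdash, hne]
          rw [List.filter_cons_of_neg (by simp [hg])]
        · refine ⟨?_, by simp⟩
          intro x hx
          have hx0 : x = (0 : Int) := (Option.some.inj hx).symm
          refine ⟨0, by simp [hx0], by omega, ?_, ?_⟩
          · have hidx : i + 1 - 0 - 1 = i := by omega
            rw [hidx, hch]
            exact hslash
          · intro m hm1 hm2
            exact absurd hm2 (by omega)
      · by_cases hsp : ch = ' '
        · subst hsp
          cases d with
          | some x =>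
            obtain ⟨k, rfl, hslk⟩ := hinv.1 x rfl
            have hgood : goodB cs i = true ↔ k < 39 := by
              rw [goodB_iff]
              unfold Good
              constructor
              · rintro (hd | ⟨_, k', h39, hsl'⟩)
                · rw [hch] at hd
                  exact absurd hd hdash
                · rwa [slashAt_unique hslk hsl']
              · intro h
                exact Or.inr ⟨by rw [hch], k, h, hslk⟩
            have hinv' : pvInv cs (i + 1) (some ((k : Int) + 1)) := by
              refine ⟨?_, by simp⟩
              intro y hy
              have hy' : y = (k : Int) + 1 := (Option.some.inj hy).symm
              obtain ⟨hk1, hk2, hk3⟩ := hslk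
              refine ⟨k + 1, by simp [hy'], by omega, ?_, ?_⟩
              · have hidx : i + 1 - (k + 1) - 1 = i - k - 1 := by omega
                rw [hidx]
                exact hk2
              · intro m hm1 hm2
                rcases Nat.lt_or_ge m i with hmi | hmi
                · exact hk3 m (by omega) hmi
                · have hmeq : m = i := by omega
                  rw [hmeq, hch]
            by_cases hk39 : (k : Int) + 1 ≤ 39
            · have hstep : pvStepB (acc, some (k : Int)) ((i : Int), ' ')
                  = (acc ++ [(i : Int)], some ((k : Int) + 1)) := by
                simp [pvStepB, pvDash, pvSlash, hk39]
              rw [hstep, ih (i + 1) (some ((k : Int) + 1)) (acc ++ [(i : Int)]) htl hinv']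
              rw [List.filter_cons_of_pos (hgood.mpr (by omega)), List.map_cons]
              simp
            · have hstep : pvStepB (acc, some (k : Int)) ((i : Int), ' ')
                  = (acc, some ((k : Int) + 1)) := by
                simp [pvStepB, pvDash, pvSlash, hk39]
              rw [hstep, ih (i + 1) (some ((k : Int) + 1)) acc htl hinv']
              have hg : goodB cs i = false := by
                rw [Bool.eq_false_iff]
                intro h
                exact hk39 (by have := hgood.mp h; omega)
              rw [List.filter_cons_of_neg (by simp [hg])]
          | none =>
            have hstep : pvStepB (acc, none) ((i : Int), ' ') = (acc, none) := by
              simp [pvStepB, pvDash, pvSlash]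
            have hnone : ∀ k : Nat, ¬ SlashAt cs (i + 1) k := by
              intro k hsl
              obtain ⟨h1s, h2s, h3s⟩ := hsl
              rcases Nat.eq_zero_or_pos k with hk | hk
              · subst hk
                have hidx : i + 1 - 0 - 1 = i := by omega
                rw [hidx, hch] at h2s
                exact absurd h2s (by decide)
              · refine hinv.2 rfl (k - 1) ⟨by omega, ?_, ?_⟩
                · have hidx : i - (k - 1) - 1 = i + 1 - k - 1 := by omega
                  rw [hidx]
                  exact h2s
                · intro m hm1 hm2
                  exact h3s m (by omega) (by omega)
            rw [hstep, ih (i + 1) none acc htl ⟨by simp, fun _ => hnone⟩]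
            have hg : goodB cs i = false := by
              rw [Bool.eq_false_iff]
              intro h
              rw [goodB_iff] at h
              rcases h with hd | ⟨_, k', _, hsl'⟩
              · rw [hch] at hd
                exact hdash hd
              · exact hinv.2 rfl k' hsl'
            rw [List.filter_cons_of_neg (by simp [hg])]
        · -- other character: reset
          have hstep : pvStepB (acc, d) ((i : Int), ch) = (acc, none) := by
            cases d <;> simp [pvStepB, hdash, hslash, hsp]
          have hnone : ∀ k : Nat, ¬ SlashAt cs (i + 1) k := by
            intro k hsl
            obtain ⟨h1s, h2s, h3s⟩ := hsl
            rcases Nat.eq_zero_or_pos k with hk | hk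
            · subst hk
              have hidx : i + 1 - 0 - 1 = i := by omega
              rw [hidx, hch] at h2s
              exact hslash h2s
            · have := h3s i (by omega) (by omega)
              rw [hch] at this
              exact hsp this
          rw [hstep, ih (i + 1) none acc htl ⟨by simp, fun _ => hnone⟩]
          have hg : goodB cs i = false := by
            rw [Bool.eq_false_iff]
            intro h
            rw [goodB_iff] at h
            rcases h with hd | ⟨hsp', _⟩
            · rw [hch] at hd
              exact hdash hd
            · rw [hch] at hsp'
              exact hsp hsp'
          rw [List.filter_cons_of_neg (by simp [hg])]

lemma lineB_eq (cs : List Char) : pvLineB cs = pvTgt cs := by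
  unfold pvLineB
  have h := B_loop cs cs 0 none [] (by simp) ⟨by simp, fun _ k hsl => by
    have := hsl.1; omega⟩
  simp only [Nat.cast_zero] at h
  rw [h]
  simp [pvTgt, List.range_eq_range']

lemma line_eq (cs : List Char) : pvLineA cs = pvLineB cs := by
  rw [lineA_eq, lineB_eq]

-- ===== VERDICT (by name: the statement is the Claim_ definition above) =====
theorem compute_bit_positions_spec : Claim_equal_compute_bit_positions := by
  intro cable_lines _
  unfold Spec_compute_bit_positions compute_bit_positions compute_bit_positions_alt
  rw [PySem.List.foldl_append_singleton_eq_map, PySem.List.foldl_append_singleton_eq_map]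
  simp only [List.nil_append]
  exact List.map_congr_left (fun s _ => line_eq s.toList)
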